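-- pv_equiv track=rewrite | github.com/RogerGuevara555/Portafolios-de-proyectos | suma.py | agregar_ceros
-- ===== SOURCE A (Python) =====
-- def agregar_ceros(a : list ,b : list):
--     ac, bc = a.copy(), b.copy()
--     ceros_a_agregar = int(len(a) - len(b))
--
--     if ceros_a_agregar >= 0: ind = 2
--     if ceros_a_agregar < 0: ind = 1
--     menor = {
--         1 : ac,
--         2 : bc
--     }.get(ind)
--
--     for i in range(abs(ceros_a_agregar)):
--         menor.insert(0, 0)
--
--     return ac, bc
-- ===== SOURCE B (Python) =====
-- def agregar_ceros(a: list, b: list):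
--     n = max(len(a), len(b))
--     return [0] * (n - len(a)) + list(a), [0] * (n - len(b)) + list(b)
-- ===== Notes on version B (the rewrite author's own statement) =====
-- stated objective: simpler
-- what changed: Replaces the copy/branch/dict-dispatch/per-element insert(0,0) loop with a single target length n = max(len(a), len(b)) and two symmetric pad-and-concatenate expressions.
import Mathlib
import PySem

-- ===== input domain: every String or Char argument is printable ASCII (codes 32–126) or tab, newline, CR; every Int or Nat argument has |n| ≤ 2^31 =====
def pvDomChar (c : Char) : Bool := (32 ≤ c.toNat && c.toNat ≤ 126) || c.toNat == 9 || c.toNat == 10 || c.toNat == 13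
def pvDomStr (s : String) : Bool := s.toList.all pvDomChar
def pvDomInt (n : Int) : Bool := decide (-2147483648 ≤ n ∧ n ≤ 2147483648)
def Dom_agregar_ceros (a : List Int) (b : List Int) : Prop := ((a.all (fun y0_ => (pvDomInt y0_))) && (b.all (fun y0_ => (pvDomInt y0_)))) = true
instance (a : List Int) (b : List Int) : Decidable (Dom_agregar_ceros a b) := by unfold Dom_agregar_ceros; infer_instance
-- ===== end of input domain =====

-- B pads both lists to n = max(len a, len b) by concatenation, replacing A's branch/dict dispatch and per-element insert(0,0) loop (objective: simpler).

-- ===== PORT A =====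
def agregar_ceros (a : List Int) (b : List Int) : List Int × List Int :=
  let ac := a
  let bc := b
  let ceros_a_agregar : Int := (a.length : Int) - (b.length : Int)
  let ind : Int := if ceros_a_agregar ≥ 0 then 2 else 1
  -- menor aliases ac or bc; the insert(0,0) loop mutates that list in place
  if ind == 2 then
    let bc := (List.range ceros_a_agregar.natAbs).foldl (fun m _ => PySem.List.insert m 0 0) bc
    (ac, bc)
  else
    let ac := (List.range ceros_a_agregar.natAbs).foldl (fun m _ => PySem.List.insert m 0 0) ac
    (ac, bc)

-- ===== PORT B =====
def agregar_ceros_alt (a : List Int) (b : List Int) : List Int × List Int :=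
  let n := max a.length b.length
  (List.replicate (n - a.length) 0 ++ a, List.replicate (n - b.length) 0 ++ b)

-- ===== PRECONDITION & SPEC =====
def Spec_agregar_ceros (a : List Int) (b : List Int) (out : List Int × List Int) : Prop := out = agregar_ceros_alt a b
instance (a : List Int) (b : List Int) (out : List Int × List Int) : Decidable (Spec_agregar_ceros a b out) := by unfold Spec_agregar_ceros; infer_instance

-- ===== CLAIM (what is proved, stated in full; the proofs are below) =====
def Claim_equal_agregar_ceros : Prop := ∀ (a : List Int) (b : List Int), Dom_agregar_ceros a b → Spec_agregar_ceros a b (agregar_ceros a b)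

-- ===== LEMMAS AND PROOFS =====
theorem foldl_insert_zero (k : Nat) (m : List Int) :
    (List.range k).foldl (fun m _ => PySem.List.insert m 0 0) m = List.replicate k 0 ++ m := by
  induction k with
  | zero => simp
  | succ k ih =>
      rw [List.range_succ, List.foldl_append, ih]
      simp only [List.foldl_cons, List.foldl_nil, PySem.List.insert_zero]
      rw [List.replicate_succ, List.cons_append]

-- ===== VERDICT (by name: the statement is the Claim_ definition above) =====
theorem agregar_ceros_spec : Claim_equal_agregar_ceros := by
  intro a b _
  unfold Spec_agregar_ceros agregar_ceros agregar_ceros_alt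
  simp only [foldl_insert_zero]
  by_cases h : (b.length : Int) ≤ (a.length : Int)
  · have h1 : ((a.length : Int) - b.length).natAbs = a.length - b.length := by omega
    have h2 : max a.length b.length = a.length := by omega
    simp [h, h1, h2]
  · have h1 : ((a.length : Int) - b.length).natAbs = b.length - a.length := by omega
    have h2 : max a.length b.length = b.length := by omega
    simp [h, h1, h2]
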